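-- pv_equiv track=rewrite | github.com/cdamore/CMPUT496-Assignment-1 | assignment1/gtp_connection_go1.py | get_territory
-- ===== SOURCE A (Python) =====
-- def get_territory(emptys):
--     cur_color = emptys[0][2]
--     for item in emptys:
--         if (cur_color != 'n'):
--             if (item[2] == 'b'):
--                 if (cur_color == 'w'):
--                     cur_color = 'n'
--                 else:
--                     cur_color = 'b'
--             elif (item[2] == 'w'):
--                 if (cur_color == 'b'):
--                     cur_color = 'n'
--                 else:
--                     cur_color = 'w'
--     return cur_color
-- ===== SOURCE B (Python) =====
-- def get_territory(emptys):
--     first = emptys[0][2]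
--     if first == 'n':
--         return 'n'
--     colors = {item[2] for item in emptys if item[2] in ('b', 'w')}
--     if 'b' in colors and 'w' in colors:
--         return 'n'
--     elif 'b' in colors:
--         return 'b'
--     elif 'w' in colors:
--         return 'w'
--     else:
--         return first
-- ===== Notes on version B (the rewrite author's own statement) =====
-- stated objective: simpler
-- what changed: Replaces the order-dependent absorbing state machine over the list with a two-phase decomposition: collect the set of 'b'/'w' colors present, then classify (both->'n', one->that color, none->first color) after an early 'n' short-circuit.
import Mathlib
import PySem

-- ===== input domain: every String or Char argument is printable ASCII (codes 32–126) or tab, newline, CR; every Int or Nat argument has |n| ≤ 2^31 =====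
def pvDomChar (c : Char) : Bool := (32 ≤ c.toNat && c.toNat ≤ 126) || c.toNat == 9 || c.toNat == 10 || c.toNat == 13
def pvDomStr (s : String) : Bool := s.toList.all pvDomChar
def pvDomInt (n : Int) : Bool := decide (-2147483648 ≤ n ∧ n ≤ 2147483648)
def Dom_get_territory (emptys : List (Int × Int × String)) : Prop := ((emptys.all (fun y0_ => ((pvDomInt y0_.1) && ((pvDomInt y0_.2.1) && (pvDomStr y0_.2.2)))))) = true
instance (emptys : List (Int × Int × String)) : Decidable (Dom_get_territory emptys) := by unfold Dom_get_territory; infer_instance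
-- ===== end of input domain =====

-- B replaces A's order-dependent absorbing state machine with a collect-present-colors-then-classify decomposition (objective: simpler).


-- ===== PORT A =====
-- A's loop body: the absorbing state-machine step (same branch order as the Python).
def pvStepA (cur : String) (item : Int × Int × String) : String :=
  if cur ≠ "n" then
    if item.2.2 = "b" then (if cur = "w" then "n" else "b")
    else if item.2.2 = "w" then (if cur = "b" then "n" else "w")
    else cur
  else cur

def get_territory (emptys : List (Int × Int × String)) : String :=
  match emptys with
  | [] => ""  -- emptys[0][2] raises IndexError in Python; excluded by Pre_get_territory
  | x :: _ => emptys.foldl pvStepA x.2.2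

-- ===== PORT B =====
def get_territory_alt (emptys : List (Int × Int × String)) : String :=
  match emptys with
  | [] => ""  -- emptys[0][2] raises IndexError in Python; excluded by Pre_get_territory
  | x :: _ =>
    let first := x.2.2
    if first = "n" then "n"
    else
      let colors : PySem.Set String :=
        PySem.Set.ofList ((emptys.map (·.2.2)).filter (fun c => c == "b" || c == "w"))
      if colors.contains "b" && colors.contains "w" then "n"
      else if colors.contains "b" then "b"
      else if colors.contains "w" then "w"
      else first

-- ===== PRECONDITION & SPEC =====
-- Pre_ excludes only the empty list, on which Python A raises IndexError at emptys[0][2].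
def Pre_get_territory (emptys : List (Int × Int × String)) : Prop := emptys ≠ []
instance (emptys : List (Int × Int × String)) : Decidable (Pre_get_territory emptys) := by unfold Pre_get_territory; infer_instance
def pvWitness_get_territory : (List (Int × Int × String)) := [(1, 2, "b"), (3, 4, "w")]

def Spec_get_territory (emptys : List (Int × Int × String)) (out : String) : Prop := out = get_territory_alt emptys
instance (emptys : List (Int × Int × String)) (out : String) : Decidable (Spec_get_territory emptys out) := by unfold Spec_get_territory; infer_instance

-- ===== CLAIM (what is proved, stated in full; the proofs are below) =====
def Claim_equal_get_territory : Prop := ∀ (emptys : List (Int × Int × String)), Dom_get_territory emptys → Pre_get_territory emptys → Spec_get_territory emptys (get_territory emptys)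

-- ===== LEMMAS AND PROOFS =====

-- Characterisation of A's fold: once "n" the state is absorbing; otherwise the result depends
-- only on which of "b"/"w" occur among the item colors or equal the current state.
set_option maxHeartbeats 1000000 in
theorem pvFoldA_char (l : List (Int × Int × String)) :
    ∀ cur : String, l.foldl pvStepA cur =
      if cur = "n" then "n"
      else if (cur = "b" ∨ "b" ∈ l.map (·.2.2)) ∧ (cur = "w" ∨ "w" ∈ l.map (·.2.2)) then "n"
      else if cur = "b" ∨ "b" ∈ l.map (·.2.2) then "b"
      else if cur = "w" ∨ "w" ∈ l.map (·.2.2) then "w"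
      else cur := by
  induction l with
  | nil =>
    intro cur
    simp only [List.foldl_nil, List.map_nil, List.not_mem_nil, or_false]
    by_cases h1 : cur = "n"
    · simp [h1]
    · by_cases h2 : cur = "b"
      · simp [h1, h2]
      · by_cases h3 : cur = "w" <;> simp [h1, h2, h3]
  | cons x l ih =>
    intro cur
    rw [List.foldl_cons, ih (pvStepA cur x)]; clear ih
    by_cases hn : cur = "n"
    · have hs : pvStepA cur x = cur := by simp [pvStepA, hn]
      rw [hs]; simp [hn]
    · by_cases hb : x.2.2 = "b"
      · by_cases hcw : cur = "w"
        · have hs : pvStepA cur x = "n" := by simp [pvStepA, hn, hb, hcw]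
          rw [hs]; simp only [List.map_cons, List.mem_cons, hb]
          split_ifs <;> simp_all
        · have hs : pvStepA cur x = "b" := by simp [pvStepA, hn, hb, hcw]
          rw [hs]; simp only [List.map_cons, List.mem_cons, hb]
          split_ifs <;> simp_all
      · by_cases hw : x.2.2 = "w"
        · by_cases hcb : cur = "b"
          · have hs : pvStepA cur x = "n" := by simp [pvStepA, hn, hb, hw, hcb]
            rw [hs]; simp only [List.map_cons, List.mem_cons, hw]
            split_ifs <;> simp_all
          · have hs : pvStepA cur x = "w" := by simp [pvStepA, hn, hb, hw, hcb]
            rw [hs]; simp only [List.map_cons, List.mem_cons, hw]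
            split_ifs <;> simp_all
        · have hs : pvStepA cur x = cur := by simp [pvStepA, hn, hb, hw]
          rw [hs]; simp only [List.map_cons, List.mem_cons]
          split_ifs <;> simp_all

-- ===== VERDICT (by name: the statement is the Claim_ definition above) =====
set_option maxHeartbeats 1000000 in
theorem get_territory_spec : Claim_equal_get_territory := by
  intro emptys _ hpre
  unfold Spec_get_territory
  match emptys with
  | [] => exact absurd rfl hpre
  | x :: l =>
    show (x :: l).foldl pvStepA x.2.2 = _
    rw [pvFoldA_char]
    unfold get_territory_alt
    have hcont : ∀ c : String, c = "b" ∨ c = "w" →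
        ((PySem.Set.ofList (((x :: l).map (·.2.2)).filter (fun c => c == "b" || c == "w"))).contains c = true
          ↔ c ∈ (x :: l).map (·.2.2)) := by
      intro c hc
      rcases hc with h | h <;> subst h <;> simp [pysem]
    have hb := hcont "b" (Or.inl rfl)
    have hw := hcont "w" (Or.inr rfl)
    clear hcont
    have hmem : x.2.2 ∈ (x :: l).map (·.2.2) := by simp
    by_cases hn : x.2.2 = "n"
    · simp [hn]
    · simp only [hn, if_false, Bool.and_eq_true, hb, hw]
      have hB : (x.2.2 = "b" ∨ "b" ∈ (x :: l).map (·.2.2)) ↔ "b" ∈ (x :: l).map (·.2.2) :=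
        ⟨fun h => h.elim (fun e => e ▸ hmem) id, Or.inr⟩
      have hW : (x.2.2 = "w" ∨ "w" ∈ (x :: l).map (·.2.2)) ↔ "w" ∈ (x :: l).map (·.2.2) :=
        ⟨fun h => h.elim (fun e => e ▸ hmem) id, Or.inr⟩
      simp only [hB, hW]
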